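-- pv_equiv track=rewrite | github.com/slbelden/md5ls.py | md5ls_diff.py | md5ls_to_dict
-- ===== SOURCE A (Python) =====
-- def md5ls_to_dict(md5ls_lines):
--     """Return dict of {md5sum:[filepaths]} from md5ls_lines"""
--     HASH_END_INDEX = 32
--     PATH_START_INDEX = 34
--
--     md5_dict = {}
--
--     for line in md5ls_lines:
--         hash = line[:HASH_END_INDEX]
--         path = line[PATH_START_INDEX:]
--         if hash in md5_dict:
--             md5_dict[hash].append(path)
--         else:
--             md5_dict[hash] = [path]
--
--     return md5_dict
-- ===== SOURCE B (Python) =====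
-- def md5ls_to_dict(md5ls_lines):
--     """Return dict of {md5sum:[filepaths]} from md5ls_lines"""
--     pairs = [(line[:32], line[34:]) for line in md5ls_lines]
--     hashes = list(dict.fromkeys(h for h, _ in pairs))
--     return {h: [p for h2, p in pairs if h2 == h] for h in hashes}
-- ===== Notes on version B (the rewrite author's own statement) =====
-- stated objective: alternative
-- what changed: Replaces the incremental dict-accumulation loop with a two-phase grouping: split every line into a (hash, path) pair once, take the ordered-deduplicated hash list, and build each group by a per-hash filter comprehension.
import Mathlib
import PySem

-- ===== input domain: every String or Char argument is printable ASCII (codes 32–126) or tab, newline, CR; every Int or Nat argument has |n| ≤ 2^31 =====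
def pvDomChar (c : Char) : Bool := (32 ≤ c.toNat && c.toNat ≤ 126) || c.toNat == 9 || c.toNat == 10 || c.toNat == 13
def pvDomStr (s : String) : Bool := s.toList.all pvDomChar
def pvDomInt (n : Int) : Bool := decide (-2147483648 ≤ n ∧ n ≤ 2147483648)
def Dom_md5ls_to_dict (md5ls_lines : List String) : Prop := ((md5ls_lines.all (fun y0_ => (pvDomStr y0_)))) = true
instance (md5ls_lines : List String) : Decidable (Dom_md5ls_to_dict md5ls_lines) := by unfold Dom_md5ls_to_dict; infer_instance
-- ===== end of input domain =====

-- B replaces A's incremental dict-accumulation with a two-phase grouping (split into pairs,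
-- ordered-dedup the hashes, per-hash filter); an alternative decomposition, not faster.


-- ===== PORT A =====
def md5ls_to_dict (md5ls_lines : List String) : List (String × List String) :=
  -- hash = line[:32], path = line[34:]; 'md5_dict[hash].append(path)' = overwrite with the extended list
  (md5ls_lines.foldl (fun md5_dict line =>
      if md5_dict.contains (PySem.Str.slice line none (some 32)) then
        md5_dict.insert (PySem.Str.slice line none (some 32))
          (md5_dict.getD (PySem.Str.slice line none (some 32)) [] ++ [PySem.Str.slice line (some 34) none])
      else
        md5_dict.insert (PySem.Str.slice line none (some 32)) [PySem.Str.slice line (some 34) none])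
    PySem.Dict.empty).items

-- ===== PORT B =====
def md5ls_to_dict_alt (md5ls_lines : List String) : List (String × List String) :=
  let pairs := md5ls_lines.map (fun line =>
    (PySem.Str.slice line none (some 32), PySem.Str.slice line (some 34) none))
  let hashes := PySem.List.dedup (pairs.map (fun p => p.1))
  hashes.map (fun h => (h, (pairs.filter (fun p => p.1 == h)).map (fun p => p.2)))

-- ===== PRECONDITION & SPEC =====
def Spec_md5ls_to_dict (md5ls_lines : List String) (out : List (String × List String)) : Prop := out = md5ls_to_dict_alt md5ls_lines
instance (md5ls_lines : List String) (out : List (String × List String)) : Decidable (Spec_md5ls_to_dict md5ls_lines out) := by unfold Spec_md5ls_to_dict; infer_instance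

-- ===== CLAIM (what is proved, stated in full; the proofs are below) =====
def Claim_equal_md5ls_to_dict : Prop := ∀ (md5ls_lines : List String), Dom_md5ls_to_dict md5ls_lines → Spec_md5ls_to_dict md5ls_lines (md5ls_to_dict md5ls_lines)

-- ===== LEMMAS AND PROOFS =====

-- A's two branches are one dict 'modify' at the hash key.
theorem md5ls_body_eq_modify (d : PySem.Dict String (List String)) (line : String) :
    (if d.contains (PySem.Str.slice line none (some 32)) then
        d.insert (PySem.Str.slice line none (some 32))
          (d.getD (PySem.Str.slice line none (some 32)) [] ++ [PySem.Str.slice line (some 34) none])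
      else
        d.insert (PySem.Str.slice line none (some 32)) [PySem.Str.slice line (some 34) none])
    = d.modify (PySem.Str.slice line none (some 32)) []
        (fun v => v ++ [PySem.Str.slice line (some 34) none]) := by
  simp only [PySem.Dict.modify]
  by_cases h : d.contains (PySem.Str.slice line none (some 32))
  · simp [h]
  · simp only [Bool.not_eq_true] at h
    simp [h, PySem.Dict.getD_of_not_contains _ _ h]

-- ===== VERDICT (by name: the statement is the Claim_ definition above) =====
theorem md5ls_to_dict_spec : Claim_equal_md5ls_to_dict := by
  intro lines _
  show md5ls_to_dict lines = md5ls_to_dict_alt lines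
  unfold md5ls_to_dict md5ls_to_dict_alt
  have hfold : lines.foldl (fun md5_dict line =>
      if md5_dict.contains (PySem.Str.slice line none (some 32)) then
        md5_dict.insert (PySem.Str.slice line none (some 32))
          (md5_dict.getD (PySem.Str.slice line none (some 32)) [] ++ [PySem.Str.slice line (some 34) none])
      else
        md5_dict.insert (PySem.Str.slice line none (some 32)) [PySem.Str.slice line (some 34) none])
      PySem.Dict.empty
      = (lines.map (fun line =>
          (PySem.Str.slice line none (some 32), PySem.Str.slice line (some 34) none))).foldl
          (fun d p => PySem.Dict.modify d p.1 [] (fun v => v ++ [p.2])) PySem.Dict.empty := by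
    rw [List.foldl_map]
    exact PySem.List.foldl_congr_mem lines _ _ PySem.Dict.empty
      (fun acc x _ => md5ls_body_eq_modify acc x)
  rw [hfold]
  set pairs := lines.map (fun line =>
      (PySem.Str.slice line none (some 32), PySem.Str.slice line (some 34) none)) with hpairs
  have hnd : (pairs.foldl (fun d p => PySem.Dict.modify d p.1 [] (fun v => v ++ [p.2]))
      PySem.Dict.empty).keys.Nodup :=
    PySem.Dict.nodup_keys_foldl_modify_key pairs (fun p => p.1) []
      (fun _ p v => v ++ [p.2]) PySem.Dict.empty (by simp [PySem.Dict.keys_empty])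
  rw [PySem.Dict.items_eq_map_keys _ hnd []]
  rw [PySem.Dict.keys_foldl_modify_key pairs (fun p => p.1) [] (fun _ p v => v ++ [p.2])]
  have hkeys : PySem.Set.update (PySem.Dict.empty (κ := String) (ν := List String)).keys
      (pairs.map (fun p => p.1)) = PySem.List.dedup (pairs.map (fun p => p.1)) := by
    simp [PySem.Dict.keys_empty, PySem.List.dedup, PySem.Set.update, PySem.Set.ofList]
  rw [hkeys]
  apply List.map_congr_left
  intro h _
  rw [PySem.Dict.getD_foldl_modify_append pairs PySem.Dict.empty h]
  simp [PySem.Dict.getD_empty]
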